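-- pv_equiv track=rewrite | github.com/wbhaao/subcum | programmers/a.py | GetFixedLen
-- ===== SOURCE A (Python) =====
-- def GetFixedLen(s):
--     l = 0
--     for _ in s:
--         if (_ == ' ' or _ == ','):
--             l += 1
--         elif (_.encode().isalnum()):
--             l += 1
--         else:
--             l += 2
--     return l
-- ===== SOURCE B (Python) =====
-- def GetFixedLen(s):
--     counts = {}
--     for c in s:
--         counts[c] = counts.get(c, 0) + 1
--     total = 0
--     for c, n in counts.items():
--         if c == ' ' or c == ',' or c.encode().isalnum():
--             total += n
--         else:
--             total += 2 * n
--     return total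
-- ===== Notes on version B (the rewrite author's own statement) =====
-- stated objective: alternative
-- what changed: B builds a dictionary of per-character counts in one pass and then computes the total by weighting each DISTINCT character once (count for light, 2*count for heavy), instead of A's per-position 1-or-2 accumulator loop.
import Mathlib
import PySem

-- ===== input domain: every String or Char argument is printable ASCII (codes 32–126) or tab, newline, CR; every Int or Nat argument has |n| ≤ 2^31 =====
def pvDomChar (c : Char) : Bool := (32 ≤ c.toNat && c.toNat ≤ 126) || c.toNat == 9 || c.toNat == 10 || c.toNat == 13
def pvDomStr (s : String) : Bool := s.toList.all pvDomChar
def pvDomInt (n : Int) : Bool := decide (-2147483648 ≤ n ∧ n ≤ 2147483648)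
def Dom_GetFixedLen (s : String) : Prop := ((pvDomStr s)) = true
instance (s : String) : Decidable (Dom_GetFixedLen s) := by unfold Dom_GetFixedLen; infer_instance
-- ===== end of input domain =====

-- B counts each distinct character once in a dictionary and weights the distinct characters
-- (count for light, 2*count for heavy) instead of A's per-position 1-or-2 accumulator loop.
-- On the ASCII/tab/newline/CR domain, Python's `c.encode().isalnum()` is exactly Char.isAlphanum.

-- ===== PORT A =====
def GetFixedLen (s : String) : Int :=
  s.toList.foldl
    (fun l c =>
      if c = ' ' || c = ',' then l + 1
      else if c.isAlphanum then l + 1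
      else l + 2) 0

-- ===== PORT B =====
def GetFixedLen_alt (s : String) : Int :=
  let counts : PySem.Dict Char Int :=
    s.toList.foldl (fun d c => d.insert c (d.getD c 0 + 1)) PySem.Dict.empty
  counts.items.foldl
    (fun total p =>
      if p.1 = ' ' || p.1 = ',' || p.1.isAlphanum then total + p.2
      else total + 2 * p.2) 0

-- ===== PRECONDITION & SPEC =====
def Spec_GetFixedLen (s : String) (out : Int) : Prop := out = GetFixedLen_alt s
instance (s : String) (out : Int) : Decidable (Spec_GetFixedLen s out) := by unfold Spec_GetFixedLen; infer_instance

-- ===== CLAIM (what is proved, stated in full; the proofs are below) =====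
def Claim_equal_GetFixedLen : Prop := ∀ (s : String), Dom_GetFixedLen s → Spec_GetFixedLen s (GetFixedLen s)

-- ===== LEMMAS AND PROOFS =====

-- weight of one character: 1 if light, 2 if heavy
def pvWeight (c : Char) : Int :=
  if c = ' ' || c = ',' || c.isAlphanum then 1 else 2

theorem pv_sum_ite_single {α : Type} [DecidableEq α] (f : α → Int) (a : α) :
    ∀ (d : List α), d.Nodup → a ∈ d →
      (d.map (fun k => if k = a then f k else 0)).sum = f a := by
  intro d
  induction d with
  | nil => intro _ h; cases h
  | cons x xs ih =>
    intro hnd hmem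
    rcases List.nodup_cons.mp hnd with ⟨hx, hxs⟩
    rcases List.mem_cons.mp hmem with h | h
    · subst h
      simp only [List.map_cons, List.sum_cons]
      have hz : (xs.map (fun k => if k = a then f k else 0)).sum = 0 := by
        apply List.sum_eq_zero
        intro n hn
        rcases List.mem_map.mp hn with ⟨k, hk, rfl⟩
        have : k ≠ a := fun he => hx (he ▸ hk)
        simp [this]
      rw [hz, add_zero]; simp
    · have hxa : x ≠ a := fun he => hx (he ▸ h)
      simp only [List.map_cons, List.sum_cons, if_neg hxa]
      rw [ih hxs h]; ring

-- summing count(k) * f(k) over the deduplicated list is summing f over the list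
theorem pv_dedup_sum {α : Type} [DecidableEq α] (f : α → Int) :
    ∀ (cs : List α),
      (cs.dedup.map (fun k => (cs.count k : Int) * f k)).sum = (cs.map f).sum := by
  intro cs
  induction cs with
  | nil => simp
  | cons a as ih =>
    by_cases ha : a ∈ as
    · rw [List.dedup_cons_of_mem ha]
      have hsplit : (as.dedup.map (fun k => (((a :: as).count k : Int)) * f k)).sum
          = (as.dedup.map (fun k => (as.count k : Int) * f k)).sum
            + (as.dedup.map (fun k => if k = a then f k else 0)).sum := by
        rw [← List.sum_map_add]
        apply congrArg
        apply List.map_congr_left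
        intro k _
        by_cases hk : k = a
        · subst hk; simp [List.count_cons_self]; ring
        · simp [List.count_cons, hk]
          exact Or.inl (Ne.symm hk)
      rw [hsplit, ih,
          pv_sum_ite_single f a as.dedup as.nodup_dedup (List.mem_dedup.mpr ha)]
      simp [add_comm]
    · rw [List.dedup_cons_of_notMem ha]
      simp only [List.map_cons, List.sum_cons]
      rw [List.count_cons_self, List.count_eq_zero.mpr ha]
      have hrest : (as.dedup.map (fun k => (((a :: as).count k : Int)) * f k)).sum
          = (as.dedup.map (fun k => (as.count k : Int) * f k)).sum := by
        apply congrArg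
        apply List.map_congr_left
        intro k hk
        have hne : k ≠ a := fun he => ha (List.mem_dedup.mp (he ▸ hk))
        simp [List.count_cons]
        exact Or.inl (Ne.symm hne)
      rw [hrest, ih]
      simp

-- transport pv_dedup_sum from Mathlib's dedup (last occurrences) to PySem.Set.ofList (first occurrences)
theorem pv_ofList_sum {α : Type} [DecidableEq α] (f : α → Int) (cs : List α) :
    ((PySem.Set.ofList cs).map (fun k => (cs.count k : Int) * f k)).sum = (cs.map f).sum := by
  have hperm : (PySem.Set.ofList cs).Perm cs.dedup := by
    rw [List.perm_ext_iff_of_nodup (PySem.Set.nodup_ofList cs) cs.nodup_dedup]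
    intro a
    rw [PySem.Set.mem_ofList, List.mem_dedup]
  calc ((PySem.Set.ofList cs).map (fun k => (cs.count k : Int) * f k)).sum
      = (cs.dedup.map (fun k => (cs.count k : Int) * f k)).sum :=
        (hperm.map _).sum_eq
    _ = (cs.map f).sum := pv_dedup_sum f cs

-- A's fold is the sum of the per-character weights
theorem pv_A_eq_sum (cs : List Char) :
    cs.foldl
      (fun l c =>
        if c = ' ' || c = ',' then l + 1
        else if c.isAlphanum then l + 1
        else l + 2) 0 = (cs.map pvWeight).sum := by
  have hbody : (fun (l : Int) (c : Char) =>
        if c = ' ' || c = ',' then l + 1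
        else if c.isAlphanum then l + 1
        else l + 2) = (fun l c => l + pvWeight c) := by
    funext l c
    unfold pvWeight
    by_cases h1 : (decide (c = ' ') || decide (c = ',')) = true
    · simp [h1]
    · by_cases h2 : c.isAlphanum = true <;>
        simp [h2] <;> simp_all
  rw [hbody, PySem.List.foldl_add]
  simp

-- B's fold over the counter's items is the same sum of weights
theorem pv_B_eq_sum (cs : List Char) :
    ((cs.foldl (fun d c => d.insert c (d.getD c 0 + 1)) PySem.Dict.empty).items.foldl
      (fun total p =>
        if p.1 = ' ' || p.1 = ',' || p.1.isAlphanum then total + p.2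
        else total + 2 * p.2) 0) = (cs.map pvWeight).sum := by
  rw [PySem.Dict.foldl_insert_getD_add_one_eq_counter, PySem.Dict.items_counter]
  have hbody : (fun (total : Int) (p : Char × Int) =>
        if p.1 = ' ' || p.1 = ',' || p.1.isAlphanum then total + p.2
        else total + 2 * p.2)
      = (fun total p => total + (if p.1 = ' ' || p.1 = ',' || p.1.isAlphanum then p.2 else 2 * p.2)) := by
    funext total p
    by_cases h : (decide (p.1 = ' ') || decide (p.1 = ',') || p.1.isAlphanum) = true <;> simp [h]
  rw [hbody, PySem.List.foldl_add, List.map_map]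
  have hfun : ((fun p : Char × Int =>
        if p.1 = ' ' || p.1 = ',' || p.1.isAlphanum then p.2 else 2 * p.2)
        ∘ (fun k => (k, (cs.count k : Int))))
      = (fun k => (cs.count k : Int) * pvWeight k) := by
    funext k
    unfold pvWeight
    by_cases h : (decide (k = ' ') || decide (k = ',') || k.isAlphanum) = true <;>
      simp [Function.comp, h] <;> ring
  rw [hfun, pv_ofList_sum]
  simp

-- ===== VERDICT (by name: the statement is the Claim_ definition above) =====
theorem GetFixedLen_spec : Claim_equal_GetFixedLen := by
  intro s _
  unfold Spec_GetFixedLen GetFixedLen GetFixedLen_alt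
  rw [pv_A_eq_sum, pv_B_eq_sum]
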